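-- pv_equiv track=rewrite | github.com/angel012912/ICPC-2022 | J.py | ganaJuego
-- ===== SOURCE A (Python) =====
-- def ganaJuego(dM, dJ, cC, sC):
--     if dJ >= 23 or dM >= 23 or dM == 23 or dJ == 23 or dM > 13 or dJ > 13:
--         return -1
--     if dM <= dJ:
--         if cantidadDeck(dM, cC):
--             return dM
--         return -1
--     else:
--         if cantidadDeck(dJ, cC):
--             return dJ
--         else:
--             answer = ganaJuego(dM, dJ + 1, cC, sC)
--     return answer
--
-- def cantidadDeck(n, cC):
--     c = 0
--     max = 3
--     for i in cC:
--         if (i == n):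
--             c += 1
--     return (not(c > max))
-- ===== SOURCE B (Python) =====
-- def ganaJuego(dM, dJ, cC, sC):
--     if dM > 13 or dJ > 13:
--         return -1
--     for j in range(min(dJ, dM), dM + 1):
--         if cC.count(j) <= 3:
--             return j
--     return -1
-- ===== Notes on version B (the rewrite author's own statement) =====
-- stated objective: simpler
-- what changed: Replaces the tail recursion that bumps dJ (and the cantidadDeck counting helper) with a single scan of range(min(dJ,dM), dM+1) returning the first value appearing at most 3 times in cC, after collapsing A's redundant bust guard to dM>13 or dJ>13.
import Mathlib
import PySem

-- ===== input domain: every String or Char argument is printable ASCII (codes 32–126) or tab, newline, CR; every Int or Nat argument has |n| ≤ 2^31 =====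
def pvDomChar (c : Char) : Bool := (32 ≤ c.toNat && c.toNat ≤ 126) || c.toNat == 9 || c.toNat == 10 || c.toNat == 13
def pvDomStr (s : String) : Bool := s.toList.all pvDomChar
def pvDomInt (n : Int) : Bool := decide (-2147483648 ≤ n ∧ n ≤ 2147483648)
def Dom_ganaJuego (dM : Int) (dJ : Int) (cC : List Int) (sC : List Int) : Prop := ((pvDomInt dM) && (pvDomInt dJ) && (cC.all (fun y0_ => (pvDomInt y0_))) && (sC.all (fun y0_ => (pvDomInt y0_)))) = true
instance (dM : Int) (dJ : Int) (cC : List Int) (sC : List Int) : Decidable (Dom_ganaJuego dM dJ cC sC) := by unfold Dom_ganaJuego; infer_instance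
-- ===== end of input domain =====

-- B replaces A's tail recursion on dJ (and its counting helper) by a single scan of the
-- range min(dJ,dM)..dM for the first value occurring at most 3 times in cC (same cost, simpler).

-- ===== PORT A =====
-- literal port of cantidadDeck: count occurrences of n in cC with a fold, return not (c > 3)
def cantidadDeck (n : Int) (cC : List Int) : Bool :=
  let c : Int := cC.foldl (fun c i => if i == n then c + 1 else c) 0
  !(c > 3)

def ganaJuego (dM : Int) (dJ : Int) (cC : List Int) (sC : List Int) : Int :=
  if dJ ≥ 23 ∨ dM ≥ 23 ∨ dM = 23 ∨ dJ = 23 ∨ dM > 13 ∨ dJ > 13 then -1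
  else if dM ≤ dJ then
    if cantidadDeck dM cC then dM else -1
  else
    if cantidadDeck dJ cC then dJ
    else ganaJuego dM (dJ + 1) cC sC
termination_by (dM - dJ).toNat
decreasing_by omega

-- ===== PORT B =====
-- the for-loop 'for j in range(lo, dM+1): if cC.count(j) <= 3: return j' with its early
-- return, as a recursion on j (Python's range is lazy; exact for step 1)
def findFirstLowCount (cC : List Int) (j : Int) (dM : Int) : Option Int :=
  if h : j ≤ dM then
    if PySem.List.count cC j ≤ 3 then some j else findFirstLowCount cC (j + 1) dM
  else none
termination_by (dM + 1 - j).toNat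
decreasing_by omega

def ganaJuego_alt (dM : Int) (dJ : Int) (cC : List Int) (sC : List Int) : Int :=
  if dM > 13 ∨ dJ > 13 then -1
  else
    match findFirstLowCount cC (min dJ dM) dM with
    | some j => j
    | none => -1

-- ===== PRECONDITION & SPEC =====
def Spec_ganaJuego (dM : Int) (dJ : Int) (cC : List Int) (sC : List Int) (out : Int) : Prop := out = ganaJuego_alt dM dJ cC sC
instance (dM : Int) (dJ : Int) (cC : List Int) (sC : List Int) (out : Int) : Decidable (Spec_ganaJuego dM dJ cC sC out) := by unfold Spec_ganaJuego; infer_instance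

-- ===== CLAIM (what is proved, stated in full; the proofs are below) =====
def Claim_equal_ganaJuego : Prop := ∀ (dM : Int) (dJ : Int) (cC : List Int) (sC : List Int), Dom_ganaJuego dM dJ cC sC → Spec_ganaJuego dM dJ cC sC (ganaJuego dM dJ cC sC)

-- ===== LEMMAS AND PROOFS =====

-- cantidadDeck decides "count ≤ 3"
theorem cantidadDeck_eq (n : Int) (cC : List Int) :
    cantidadDeck n cC = (PySem.List.count cC n ≤ 3 : Bool) := by
  have h := PySem.List.foldl_beq_add_one cC n (0 : Int)
  simp only [cantidadDeck, h, PySem.List.count_eq]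
  simp
  by_cases hc : List.count n cC ≤ 3
  · simp [hc, Nat.not_lt.mpr hc]
  · simp [hc, Nat.lt_of_not_le hc]

theorem findFirstLowCount_of_le (cC : List Int) (j dM : Int) (h : j ≤ dM) :
    findFirstLowCount cC j dM =
      if PySem.List.count cC j ≤ 3 then some j else findFirstLowCount cC (j + 1) dM := by
  rw [findFirstLowCount]
  simp [h]

theorem findFirstLowCount_of_gt (cC : List Int) (j dM : Int) (h : dM < j) :
    findFirstLowCount cC j dM = none := by
  rw [findFirstLowCount]
  simp [show ¬ j ≤ dM by omega]

theorem ganaJuego_eq_alt (dM dJ : Int) (cC sC : List Int) :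
    ganaJuego dM dJ cC sC = ganaJuego_alt dM dJ cC sC := by
  by_cases hg : dJ ≥ 23 ∨ dM ≥ 23 ∨ dM = 23 ∨ dJ = 23 ∨ dM > 13 ∨ dJ > 13
  · rw [ganaJuego, if_pos hg]
    unfold ganaJuego_alt
    rw [if_pos (show dM > 13 ∨ dJ > 13 by omega)]
  · have hM : dM ≤ 13 := by omega
    have hJ : dJ ≤ 13 := by omega
    have hgn : ¬(dJ ≥ 23 ∨ dM ≥ 23 ∨ dM = 23 ∨ dJ = 23 ∨ dM > 13 ∨ dJ > 13) := hg
    clear hg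
    by_cases hle : dM ≤ dJ
    · unfold ganaJuego_alt
      rw [if_neg (show ¬(dM > 13 ∨ dJ > 13) by omega)]
      rw [show min dJ dM = dM from by omega]
      rw [findFirstLowCount_of_le cC dM dM le_rfl]
      rw [ganaJuego, if_neg hgn, if_pos hle, cantidadDeck_eq]
      simp only [PySem.List.count_eq]
      by_cases hc : List.count dM cC ≤ 3
      · simp [hc]
      · simp [hc, findFirstLowCount_of_gt cC (dM + 1) dM (by omega)]
    · -- dJ < dM : induct on the gap
      have hlt : dJ < dM := by omega
      clear hle
      induction h : (dM - dJ).toNat generalizing dJ with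
      | zero => omega
      | succ k ih =>
        have hgn : ¬(dJ ≥ 23 ∨ dM ≥ 23 ∨ dM = 23 ∨ dJ = 23 ∨ dM > 13 ∨ dJ > 13) := by omega
        unfold ganaJuego_alt
        rw [if_neg (show ¬(dM > 13 ∨ dJ > 13) by omega)]
        rw [show min dJ dM = dJ from by omega]
        rw [findFirstLowCount_of_le cC dJ dM (by omega)]
        rw [ganaJuego, if_neg hgn, if_neg (show ¬(dM ≤ dJ) by omega), cantidadDeck_eq]
        simp only [PySem.List.count_eq]
        by_cases hcj : List.count dJ cC ≤ 3
        · simp [hcj]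
        · rw [if_neg (by simp [hcj]), if_neg hcj]
          by_cases hlt2 : dJ + 1 < dM
          · rw [ih (dJ + 1) (by omega) (by omega) hlt2 (by omega)]
            unfold ganaJuego_alt
            rw [if_neg (show ¬(dM > 13 ∨ dJ + 1 > 13) by omega)]
            rw [show min (dJ + 1) dM = dJ + 1 from by omega]
          · have heq : dJ + 1 = dM := by omega
            rw [ganaJuego, if_neg (by omega), if_pos (by omega), cantidadDeck_eq, heq]
            rw [findFirstLowCount_of_le cC dM dM le_rfl]
            simp only [PySem.List.count_eq]
            by_cases hc : List.count dM cC ≤ 3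
            · simp [hc]
            · simp [hc, findFirstLowCount_of_gt cC (dM + 1) dM (by omega)]

-- ===== VERDICT (by name: the statement is the Claim_ definition above) =====
theorem ganaJuego_spec : Claim_equal_ganaJuego := by
  intro dM dJ cC sC _
  exact ganaJuego_eq_alt dM dJ cC sC
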